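-- pv_equiv track=rewrite | github.com/shobhitmir/placeme | base/views.py | clean_responses
-- ===== SOURCE A (Python) =====
-- def clean_responses(responses,fields):
--     kl1 = list(fields)
--     kl2 = list(responses)
--     kv1 = list(fields.values())
--     kv2 = list(responses.values())
--     for i in range(len(kl1)):
--         if i<len(kl2) and kl1[i] != kl2[i]:
--             kl2.insert(i,kl1[i])
--             kv2.insert(i,None)
--         elif i>=len(kl2):
--             kl2.append(kl1[i])
--             kv2.append(None)
--     responses = {}
--     for i in range(len(kl2)):
--         responses[kl2[i]] = kv2[i]
--     return responses
-- ===== SOURCE B (Python) =====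
-- def clean_responses(responses, fields):
--     # Single-pass two-pointer merge: walk fields and responses together, filling None
--     # for missing keys and appending any leftover response items; O(n) instead of
--     # A's O(n^2) mid-list inserts.
--     out = {}
--     items = iter(responses.items())
--     nxt = next(items, None)
--     for k in fields:
--         if nxt is not None and nxt[0] == k:
--             out[k] = nxt[1]
--             nxt = next(items, None)
--         else:
--             out[k] = None
--     while nxt is not None:
--         out[nxt[0]] = nxt[1]
--         nxt = next(items, None)
--     return out
-- ===== Notes on version B (the rewrite author's own statement) =====
-- stated objective: faster
-- what changed: Replaced the index loop that repeatedly list.insert()s missing field keys into copies of the response key/value lists (then rebuilds a dict by index) with a single-pass two-pointer merge over fields and response items that writes the output dict directly.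
import Mathlib
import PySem

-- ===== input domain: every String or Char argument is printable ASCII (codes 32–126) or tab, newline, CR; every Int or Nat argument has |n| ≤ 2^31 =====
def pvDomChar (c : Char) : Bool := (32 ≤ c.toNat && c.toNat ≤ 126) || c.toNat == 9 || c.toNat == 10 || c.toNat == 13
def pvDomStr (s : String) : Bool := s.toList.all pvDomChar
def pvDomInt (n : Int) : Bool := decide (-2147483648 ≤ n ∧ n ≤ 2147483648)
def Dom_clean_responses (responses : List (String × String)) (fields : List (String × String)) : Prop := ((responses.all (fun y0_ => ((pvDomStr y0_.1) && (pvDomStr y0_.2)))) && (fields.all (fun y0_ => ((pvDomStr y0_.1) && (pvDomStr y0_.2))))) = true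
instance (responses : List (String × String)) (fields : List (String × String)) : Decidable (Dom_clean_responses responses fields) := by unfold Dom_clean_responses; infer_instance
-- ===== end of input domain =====

-- B replaces A's quadratic index loop with mid-list inserts by a linear two-pointer
-- merge that writes the output dict directly (return value only; neither mutates its arguments).

-- ===== PORT A =====
-- literal port of A: copy the key lists, patch kl2/kv2 by index with list.insert/append,
-- then rebuild a dict by index.  kl1[i]/kl2[i] are read with pyGetD: the range and the
-- explicit `i < len(kl2)` guard keep every read in range, so the default is never used.
def clean_responses (responses : List (String × String)) (fields : List (String × String)) : List (String × Option String) :=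
  let fd := PySem.Dict.ofList fields
  let rd := PySem.Dict.ofList responses
  let kl1 := PySem.Dict.keys fd
  let kl2 := PySem.Dict.keys rd
  let _kv1 := PySem.Dict.values fd   -- A computes kv1 and never uses it
  let kv2 := (PySem.Dict.values rd).map Option.some
  let st := (PySem.List.pyRange 0 (kl1.length : Int) 1).foldl
    (fun (st : List String × List (Option String)) i =>
      if i < (st.1.length : Int) ∧ PySem.List.pyGetD kl1 i "" ≠ PySem.List.pyGetD st.1 i "" then
        (PySem.List.insert st.1 i (PySem.List.pyGetD kl1 i ""), PySem.List.insert st.2 i none)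
      else if (st.1.length : Int) ≤ i then
        (st.1 ++ [PySem.List.pyGetD kl1 i ""], st.2 ++ [none])
      else st) (kl2, kv2)
  ((PySem.List.pyRange 0 (st.1.length : Int) 1).foldl
    (fun d i => PySem.Dict.insert d (PySem.List.pyGetD st.1 i "") (PySem.List.pyGetD st.2 i none))
    PySem.Dict.empty).items

-- ===== PORT B =====
-- two-pointer merge: walk the field keys and the response items together, inserting
-- matched values or none into the output dict; leftover response items are flushed at the end.
def cleanAltGo : List String → List (String × String) → PySem.Dict String (Option String) → PySem.Dict String (Option String)
  | [], rs, d => rs.foldl (fun d p => PySem.Dict.insert d p.1 (some p.2)) d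
  | k :: ks, [], d => cleanAltGo ks [] (PySem.Dict.insert d k none)
  | k :: ks, (rk, rv) :: rt, d =>
      if rk = k then cleanAltGo ks rt (PySem.Dict.insert d k (some rv))
      else cleanAltGo ks ((rk, rv) :: rt) (PySem.Dict.insert d k none)

def clean_responses_alt (responses : List (String × String)) (fields : List (String × String)) : List (String × Option String) :=
  (cleanAltGo (PySem.Dict.keys (PySem.Dict.ofList fields))
              (PySem.Dict.items (PySem.Dict.ofList responses))
              PySem.Dict.empty).items

-- ===== PRECONDITION & SPEC =====
def Spec_clean_responses (responses : List (String × String)) (fields : List (String × String)) (out : List (String × Option String)) : Prop := out = clean_responses_alt responses fields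
instance (responses : List (String × String)) (fields : List (String × String)) (out : List (String × Option String)) : Decidable (Spec_clean_responses responses fields out) := by unfold Spec_clean_responses; infer_instance

-- ===== CLAIM (what is proved, stated in full; the proofs are below) =====
def Claim_equal_clean_responses : Prop := ∀ (responses : List (String × String)) (fields : List (String × String)), Dom_clean_responses responses fields → Spec_clean_responses responses fields (clean_responses responses fields)

-- ===== LEMMAS AND PROOFS =====

-- the merged key/value sequence both programs realise
def mergeZip : List String → List (String × String) → List (String × Option String)
  | [], rs => rs.map (fun p => (p.1, some p.2))
  | k :: ks, [] => (k, none) :: mergeZip ks []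
  | k :: ks, (rk, rv) :: rt =>
      if rk = k then (k, some rv) :: mergeZip ks rt
      else (k, none) :: mergeZip ks ((rk, rv) :: rt)

-- B's dict recursion is folding inserts over the merged sequence
lemma cleanAltGo_eq (ks : List String) (rs : List (String × String))
    (d : PySem.Dict String (Option String)) :
    cleanAltGo ks rs d = (mergeZip ks rs).foldl (fun d p => PySem.Dict.insert d p.1 p.2) d := by
  induction ks generalizing rs d with
  | nil =>
      simp only [cleanAltGo, mergeZip, List.foldl_map]
  | cons k kt ih =>
      cases rs with
      | nil => simp [cleanAltGo, mergeZip, ih]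
      | cons p rt =>
        obtain ⟨rk, rv⟩ := p
        by_cases h : rk = k <;> simp [cleanAltGo, mergeZip, h, ih]

lemma pyGetD_append_cons_self {α : Type} [Inhabited α] (pre : List α) (x : α) (l : List α) (d : α) :
    PySem.List.pyGetD (pre ++ x :: l) (pre.length : Int) d = x := by
  rw [PySem.List.pyGetD_natCast]
  simp [List.getD]

-- A's first loop, run from position pre.length with pre already fixed, realises mergeZip
lemma loop1 (kl1 : List String) (ks pre : List String) (rs : List (String × String))
    (vs : List (Option String)) (hkl : kl1 = pre ++ ks) (hvs : vs.length = pre.length) :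
    (PySem.List.pyRange (pre.length : Int) (kl1.length : Int) 1).foldl
      (fun (st : List String × List (Option String)) i =>
        if i < (st.1.length : Int) ∧ PySem.List.pyGetD kl1 i "" ≠ PySem.List.pyGetD st.1 i "" then
          (PySem.List.insert st.1 i (PySem.List.pyGetD kl1 i ""), PySem.List.insert st.2 i none)
        else if (st.1.length : Int) ≤ i then
          (st.1 ++ [PySem.List.pyGetD kl1 i ""], st.2 ++ [none])
        else st)
      (pre ++ rs.map (fun x => x.1), vs ++ rs.map (fun p => some p.2))
    = (pre ++ (mergeZip ks rs).map (fun x => x.1), vs ++ (mergeZip ks rs).map (fun x => x.2)) := by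
  induction ks generalizing pre rs vs with
  | nil =>
      rw [PySem.List.pyRange_one_eq_nil (by simp [hkl])]
      simp [mergeZip, List.map_map, Function.comp_def]
  | cons k kt ih =>
      have hlt : (pre.length : Int) < (kl1.length : Int) := by
        simp only [hkl, List.length_append, List.length_cons]; omega
      rw [PySem.List.pyRange_one_cons hlt, List.foldl_cons]
      have hget : PySem.List.pyGetD kl1 (pre.length : Int) "" = k := by
        rw [hkl]; exact pyGetD_append_cons_self pre k kt ""
      have hkl' : kl1 = (pre ++ [k]) ++ kt := by simp [hkl]
      have harg : ((pre ++ [k]).length : Int) = (pre.length : Int) + 1 := by simp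
      cases rs with
      | nil =>
          simp only [List.map_nil, List.append_nil]
          rw [if_neg (by simp)]
          rw [if_pos (by simp)]
          rw [hget]
          have := ih (pre := pre ++ [k]) (rs := []) (vs := vs ++ [none]) hkl' (by simp [hvs])
          simp only [List.map_nil, List.append_nil, harg] at this
          rw [this]
          simp [mergeZip]
      | cons p rt =>
          obtain ⟨rk, rv⟩ := p
          simp only [List.map_cons]
          have hget2 : PySem.List.pyGetD (pre ++ rk :: rt.map (fun x => x.1)) (pre.length : Int) "" = rk :=
            pyGetD_append_cons_self pre rk (rt.map (fun x => x.1)) ""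
          by_cases h : rk = k
          · rw [if_neg (by rw [hget, hget2, h]; simp)]
            rw [if_neg (by simp)]
            have := ih (pre := pre ++ [k]) (rs := rt) (vs := vs ++ [some rv]) hkl' (by simp [hvs])
            simp only [harg] at this
            rw [show pre ++ rk :: rt.map (fun x => x.1) = (pre ++ [k]) ++ rt.map (fun x => x.1) by simp [h],
              show vs ++ some rv :: rt.map (fun p => some p.2) = (vs ++ [some rv]) ++ rt.map (fun p => some p.2) by simp,
              this]
            simp [mergeZip, h]
          · rw [if_pos (by exact ⟨by simp only [List.length_append, List.length_cons]; omega,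
                by rw [hget, hget2]; exact fun hc => h hc.symm⟩), hget]
            have hins1 : PySem.List.insert (pre ++ rk :: rt.map (fun x => x.1)) (pre.length : Int) k
                = (pre ++ [k]) ++ rk :: rt.map (fun x => x.1) := by
              rw [PySem.List.insert_natCast _ _ _ (by simp)]
              simp
            have hins2 : PySem.List.insert (vs ++ some rv :: rt.map (fun p => some p.2)) (pre.length : Int) none
                = (vs ++ [none]) ++ some rv :: rt.map (fun p => some p.2) := by
              rw [← hvs, PySem.List.insert_natCast _ _ _ (by simp)]
              simp
            have := ih (pre := pre ++ [k]) (rs := (rk, rv) :: rt) (vs := vs ++ [none]) hkl' (by simp [hvs])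
            simp only [harg, List.map_cons] at this
            rw [hins1, hins2, this]
            simp [mergeZip, h]

lemma loop2 (xs : List String) (ys : List (Option String)) (h : xs.length = ys.length)
    (d0 : PySem.Dict String (Option String)) :
    (PySem.List.pyRange 0 (xs.length : Int) 1).foldl
      (fun d i => PySem.Dict.insert d (PySem.List.pyGetD xs i "") (PySem.List.pyGetD ys i none)) d0
    = (xs.zip ys).foldl (fun d p => PySem.Dict.insert d p.1 p.2) d0 := by
  have aux : ∀ n : Nat, n ≤ xs.length →
      (PySem.List.pyRange 0 (n : Int) 1).foldl
        (fun d i => PySem.Dict.insert d (PySem.List.pyGetD xs i "") (PySem.List.pyGetD ys i none)) d0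
      = ((xs.zip ys).take n).foldl (fun d p => PySem.Dict.insert d p.1 p.2) d0 := by
    intro n hn
    induction n with
    | zero => rw [PySem.List.pyRange_one_eq_nil (by simp)]; simp
    | succ m ihm =>
        have hm : m < xs.length := hn
        have hmy : m < ys.length := h ▸ hm
        have : ((m + 1 : Nat) : Int) = (m : Int) + 1 := by push_cast; ring
        rw [this, PySem.List.pyRange_one_succ_right (by positivity), List.foldl_append,
          ihm (Nat.le_of_lt hm), List.take_add_one]
        simp [PySem.List.pyGetD_natCast, List.getD, hm, hmy,
          Nat.lt_min.mpr ⟨hm, hmy⟩]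
  have := aux xs.length (Nat.le_refl _)
  rwa [List.take_of_length_le (by simp [h])] at this

-- ===== VERDICT (by name: the statement is the Claim_ definition above) =====
theorem clean_responses_spec : Claim_equal_clean_responses := by
  intro responses fields _
  unfold Spec_clean_responses clean_responses clean_responses_alt
  dsimp only
  have h1 : PySem.Dict.keys (PySem.Dict.ofList responses)
      = ([] : List String) ++ ((PySem.Dict.ofList responses).items).map (fun x => x.1) := by
    simp [PySem.Dict.keys]
  have h2 : (PySem.Dict.values (PySem.Dict.ofList responses)).map Option.some
      = ([] : List (Option String)) ++ ((PySem.Dict.ofList responses).items).map (fun p => some p.2) := by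
    simp [PySem.Dict.values, List.map_map, Function.comp_def]
  rw [h1, h2,
    show (0 : Int) = (([] : List String).length : Int) from by simp,
    loop1 (PySem.Dict.keys (PySem.Dict.ofList fields)) (PySem.Dict.keys (PySem.Dict.ofList fields))
      [] ((PySem.Dict.ofList responses).items) [] (by simp) rfl]
  simp only [List.nil_append]
  simp only [List.length_nil, Nat.cast_zero]
  rw [loop2 _ _ (by simp), List.zip_map', cleanAltGo_eq]
  simp
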